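-- pv_equiv track=rewrite | github.com/baadshah02/asset-discovery-bot | bot/fundamentals.py | _latest_quarterly
-- ===== SOURCE A (Python) =====
-- from typing import Any, Iterable
--
-- def _latest_quarterly(entries: list[dict[str, Any]], n: int) -> list[dict[str, Any]]:
--     """Newest-first ``n`` entries deduped on ``end`` (amendments preserved)."""
--     filtered = [e for e in entries if e.get("fp") in {"Q1", "Q2", "Q3", "FY"}]
--     filtered.sort(
--         key=lambda e: (str(e.get("end", "")), str(e.get("filed", ""))),
--         reverse=True,
--     )
--     seen: set[str] = set()
--     deduped: list[dict[str, Any]] = []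
--     for entry in filtered:
--         end = str(entry.get("end", ""))
--         if end in seen:
--             continue
--         seen.add(end)
--         deduped.append(entry)
--     return deduped[:n]
-- ===== SOURCE B (Python) =====
-- def _latest_quarterly(entries, n):
--     """Newest-first ``n`` entries deduped on ``end`` (amendments preserved)."""
--     best = {}
--     for e in entries:
--         if e.get("fp") not in {"Q1", "Q2", "Q3", "FY"}:
--             continue
--         end = str(e.get("end", ""))
--         filed = str(e.get("filed", ""))
--         cur = best.get(end)
--         if cur is None or cur[0] < filed:
--             best[end] = (filed, e)
--     deduped = sorted(
--         (v[1] for v in best.values()),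
--         key=lambda e: (str(e.get("end", "")), str(e.get("filed", ""))),
--         reverse=True,
--     )
--     return deduped[:n]
-- ===== Notes on version B (the rewrite author's own statement) =====
-- stated objective: alternative
-- what changed: B replaces A's sort-everything-then-scan-to-dedup with a single grouping pass into a dict end -> (filed, entry) that keeps the strictly greatest filed (first-encountered on ties), and only then sorts the one winner per end; so only the deduped winners are sorted instead of the whole filtered list.
import Mathlib
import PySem

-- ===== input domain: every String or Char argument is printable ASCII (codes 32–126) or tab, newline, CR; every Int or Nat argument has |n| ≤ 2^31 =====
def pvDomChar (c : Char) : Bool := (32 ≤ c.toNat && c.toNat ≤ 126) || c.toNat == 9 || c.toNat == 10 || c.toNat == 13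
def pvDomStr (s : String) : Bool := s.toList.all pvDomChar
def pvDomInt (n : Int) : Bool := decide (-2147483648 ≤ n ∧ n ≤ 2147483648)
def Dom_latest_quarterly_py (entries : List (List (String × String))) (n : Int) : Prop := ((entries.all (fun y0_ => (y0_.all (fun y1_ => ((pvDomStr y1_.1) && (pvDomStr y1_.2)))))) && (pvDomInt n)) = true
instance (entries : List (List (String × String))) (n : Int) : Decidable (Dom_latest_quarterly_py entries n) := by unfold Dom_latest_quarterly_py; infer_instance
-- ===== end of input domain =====

-- B groups the filtered entries in one pass into a dict end → (filed, entry) keeping the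
-- greatest filed (first-encountered on ties) and sorts only the winners, instead of A's
-- sort-all-then-scan-to-dedup; objective: alternative (same observable result, proved below).

-- Shared transliterations of the Python expressions e.get(k), the fp-set test and the two str() sort keys.
def pvGet (e : List (String × String)) (k : String) : Option String := PySem.Dict.get? (PySem.Dict.mk e) k
def pvFpOK (e : List (String × String)) : Bool :=
  match pvGet e "fp" with
  | some s => PySem.Set.contains (PySem.Set.ofList ["Q1", "Q2", "Q3", "FY"]) s
  | none => false
def pvEnd (e : List (String × String)) : String := (pvGet e "end").getD ""
def pvFiled (e : List (String × String)) : String := (pvGet e "filed").getD ""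

-- ===== PORT A =====
def latest_quarterly_py (entries : List (List (String × String))) (n : Int) : List (List (String × String)) :=
  let filtered := entries.filter pvFpOK
  let filtered := PySem.List.sorted2 filtered pvEnd pvFiled true
  let st := filtered.foldl
    (fun (st : PySem.Set String × List (List (String × String))) entry =>
      let e := pvEnd entry
      if PySem.Set.contains st.1 e then st
      else (PySem.Set.add st.1 e, st.2 ++ [entry]))
    (PySem.Set.empty, [])
  PySem.List.slice st.2 none (some n)

-- ===== PORT B =====
def latest_quarterly_py_alt (entries : List (List (String × String))) (n : Int) : List (List (String × String)) :=
  let best := entries.foldl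
    (fun (d : PySem.Dict String (String × List (String × String))) e =>
      if pvFpOK e then
        match d.get? (pvEnd e) with
        | none => d.insert (pvEnd e) (pvFiled e, e)
        | some cur => if cur.1 < pvFiled e then d.insert (pvEnd e) (pvFiled e, e) else d
      else d)
    PySem.Dict.empty
  let deduped := PySem.List.sorted2 (best.values.map (fun v => v.2)) pvEnd pvFiled true
  PySem.List.slice deduped none (some n)

-- ===== PRECONDITION & SPEC =====
def Spec_latest_quarterly_py (entries : List (List (String × String))) (n : Int) (out : List (List (String × String))) : Prop := out = latest_quarterly_py_alt entries n
instance (entries : List (List (String × String))) (n : Int) (out : List (List (String × String))) : Decidable (Spec_latest_quarterly_py entries n out) := by unfold Spec_latest_quarterly_py; infer_instance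

-- ===== CLAIM (what is proved, stated in full; the proofs are below) =====
def Claim_equal_latest_quarterly_py : Prop := ∀ (entries : List (List (String × String))) (n : Int), Dom_latest_quarterly_py entries n → Spec_latest_quarterly_py entries n (latest_quarterly_py entries n)

-- ===== LEMMAS AND PROOFS =====

-- The reverse 'before' test sorted2 uses: bef x y ⇔ (end y, filed y) <lex (end x, filed x).
def pvBef (x y : List (String × String)) : Bool :=
  decide (pvEnd y < pvEnd x) || (!decide (pvEnd x < pvEnd y) && decide (pvFiled y < pvFiled x))

def pvSortR (l : List (List (String × String))) : List (List (String × String)) :=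
  l.foldl (fun acc x => PySem.List.insertBy pvBef x acc) []

-- strict lexicographic order on the (end, filed) key
def pvLT (a b : List (String × String)) : Prop :=
  pvEnd a < pvEnd b ∨ (pvEnd a = pvEnd b ∧ pvFiled a < pvFiled b)

theorem sorted2_eq_sortR (l : List (List (String × String))) :
    PySem.List.sorted2 l pvEnd pvFiled true = pvSortR l := rfl

theorem pvBef_iff {x y : List (String × String)} : pvBef x y = true ↔ pvLT y x := by
  unfold pvBef pvLT
  simp only [Bool.or_eq_true, Bool.and_eq_true, Bool.not_eq_true', decide_eq_true_eq,
    decide_eq_false_iff_not]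
  constructor
  · rintro (h | ⟨hn, hf⟩)
    · exact Or.inl h
    · rcases lt_trichotomy (pvEnd y) (pvEnd x) with h | h | h
      · exact Or.inl h
      · exact Or.inr ⟨h, hf⟩
      · exact absurd h hn
  · rintro (h | ⟨he, hf⟩)
    · exact Or.inl h
    · exact Or.inr ⟨fun h => absurd he (ne_of_gt h), hf⟩

theorem pvLT_asymm {a b : List (String × String)} (h : pvLT a b) : ¬ pvLT b a := by
  unfold pvLT at *
  rcases h with h | h
  · rintro (h' | h')
    · exact lt_asymm h h'
    · exact absurd h'.1.symm (ne_of_lt h)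
  · rintro (h' | h')
    · exact absurd h.1 (ne_of_gt h')
    · exact lt_asymm h.2 h'.2

theorem pvLT_of_not_of_ne {a b : List (String × String)} (h : ¬ pvLT a b)
    (hne : pvEnd a ≠ pvEnd b) : pvLT b a := by
  unfold pvLT at *
  rcases lt_trichotomy (pvEnd a) (pvEnd b) with h' | h' | h'
  · exact absurd (Or.inl h') h
  · exact absurd h' hne
  · exact Or.inl h'

theorem pvLT_of_not_of_lt {a b c : List (String × String)} (h1 : ¬ pvLT b a) (h2 : pvLT b c) :
    pvLT a c := by
  unfold pvLT at *
  push Not at h1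
  rcases h2 with h2 | h2
  · rcases lt_trichotomy (pvEnd a) (pvEnd b) with h | h | h
    · exact Or.inl (lt_trans h h2)
    · exact Or.inl (h ▸ h2)
    · exact absurd h (by simpa using h1.1)
  · rcases lt_trichotomy (pvEnd a) (pvEnd b) with h | h | h
    · exact Or.inl (h2.1 ▸ h)
    · exact Or.inr ⟨h.trans h2.1, lt_of_le_of_lt (h1.2 h.symm) h2.2⟩
    · exact absurd h (by simpa using h1.1)

theorem insertBy_split (x : List (String × String)) (S : List (List (String × String))) :
    ∃ p q, S = p ++ q ∧ PySem.List.insertBy pvBef x S = p ++ x :: q ∧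
      (∀ y ∈ p, pvBef x y = false) ∧ (∀ h t, q = h :: t → pvBef x h = true) := by
  induction S with
  | nil => exact ⟨[], [], rfl, rfl, by simp, by simp⟩
  | cons y ys ih =>
    by_cases h : pvBef x y = true
    · exact ⟨[], y :: ys, rfl, by simp [PySem.List.insertBy, h], by simp, fun h' t ht => by
        cases ht; exact h⟩
    · obtain ⟨p, q, h1, h2, h3, h4⟩ := ih
      refine ⟨y :: p, q, by simp [h1], ?_, ?_, h4⟩
      · simp [PySem.List.insertBy, h, h2]
      · intro z hz
        rcases List.mem_cons.mp hz with rfl | hz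
        · exact Bool.not_eq_true _ ▸ h
        · exact h3 z hz

theorem sortR_append_singleton (l : List (List (String × String))) (x : List (String × String)) :
    pvSortR (l ++ [x]) = PySem.List.insertBy pvBef x (pvSortR l) := by
  simp [pvSortR, List.foldl_append]

theorem sortR_perm (l : List (List (String × String))) : (pvSortR l).Perm l := by
  rw [← sorted2_eq_sortR]; exact PySem.List.sorted2_perm l pvEnd pvFiled true

theorem sortR_sorted (l : List (List (String × String))) :
    (pvSortR l).Pairwise (fun a b => ¬ pvLT a b) := by
  induction l using List.reverseRecOn with
  | nil => simp [pvSortR]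
  | append_singleton l x ih =>
    rw [sortR_append_singleton]
    obtain ⟨p, q, h1, h2, h3, h4⟩ := insertBy_split x (pvSortR l)
    rw [h2]
    rw [h1] at ih
    have hpq := List.pairwise_append.mp ih
    rw [List.pairwise_append]
    refine ⟨hpq.1, ?_, ?_⟩
    · rw [List.pairwise_cons]
      constructor
      · -- x is ¬ pvLT x z for z ∈ q
        intro z hz
        cases q with
        | nil => simp at hz
        | cons h t =>
          have hh : pvLT h x := pvBef_iff.mp (h4 h t rfl)
          rcases List.mem_cons.mp hz with rfl | hz
          · exact pvLT_asymm hh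
          · have : ¬ pvLT h z := (List.pairwise_cons.mp hpq.2.1).1 z hz
            exact pvLT_asymm (pvLT_of_not_of_lt this hh)
      · exact hpq.2.1
    · intro a ha b hb
      rcases List.mem_cons.mp hb with rfl | hb
      · have : pvBef b a = false := h3 a ha
        intro hlt
        exact absurd (pvBef_iff.mpr hlt) (by simp [this])
      · exact hpq.2.2 a ha b hb

-- first-in-original-order strict-maximum of the end-class t (what B's dict stores per key)
def pvBestOf (l : List (List (String × String))) (t : String) : Option (List (String × String)) :=
  l.foldl (fun acc e =>
    if pvEnd e = t then
      match acc with
      | none => some e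
      | some b => if pvFiled b < pvFiled e then some e else some b
    else acc) none

theorem bestOf_append_singleton (l : List (List (String × String))) (x : List (String × String)) (t : String) :
    pvBestOf (l ++ [x]) t =
      if pvEnd x = t then
        match pvBestOf l t with
        | none => some x
        | some b => if pvFiled b < pvFiled x then some x else some b
      else pvBestOf l t := by
  simp [pvBestOf, List.foldl_append]

theorem bestOf_end {l : List (List (String × String))} {t : String} {e : List (String × String)}
    (h : pvBestOf l t = some e) : pvEnd e = t := by
  have key : ∀ (l : List (List (String × String))) (acc : Option (List (String × String))),
      (∀ e', acc = some e' → pvEnd e' = t) →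
      ∀ e', (l.foldl (fun acc e =>
        if pvEnd e = t then
          match acc with
          | none => some e
          | some b => if pvFiled b < pvFiled e then some e else some b
        else acc) acc) = some e' → pvEnd e' = t := by
    intro l
    induction l with
    | nil => intro acc hacc e' h'; exact hacc e' h'
    | cons z zs ih =>
      intro acc hacc e' h'
      refine ih _ ?_ e' h'
      intro e'' h''
      by_cases hz : pvEnd z = t
      · simp only [hz] at h''
        cases acc with
        | none => cases h''; exact hz
        | some b =>
          by_cases hf : pvFiled b < pvFiled z
          · simp [hf] at h''; exact h'' ▸ hz
          · simp [hf] at h''; exact hacc e'' (by rw [h''])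
      · simp only [hz] at h''
        exact hacc e'' h''
  exact key l none (by simp) e h

-- STABILITY: the first element of the reverse-sorted list in end-class t is the class's
-- first-encountered strict maximum of filed.
theorem find_sortR (l : List (List (String × String))) (t : String) :
    (pvSortR l).find? (fun y => pvEnd y == t) = pvBestOf l t := by
  induction l using List.reverseRecOn with
  | nil => simp [pvSortR, pvBestOf]
  | append_singleton l x ih =>
    rw [sortR_append_singleton, bestOf_append_singleton]
    obtain ⟨p, q, h1, h2, h3, h4⟩ := insertBy_split x (pvSortR l)
    have hs := sortR_sorted l
    rw [h1] at hs ih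
    rw [h2, List.find?_append]
    by_cases hx : pvEnd x = t
    · rw [if_pos hx]
      rw [List.find?_append] at ih
      cases hp : List.find? (fun y => pvEnd y == t) p with
      | some b =>
        have hb : b ∈ p := List.mem_of_find?_eq_some hp
        have hbt : pvEnd b = t := by simpa using List.find?_some hp
        have hnlt : ¬ pvLT b x := fun hlt => by
          have := h3 b hb
          rw [pvBef_iff.symm] at hlt
          simp [this] at hlt
        have hbf : ¬ pvFiled b < pvFiled x := fun hf =>
          hnlt (Or.inr ⟨hbt.trans hx.symm, hf⟩)
        rw [hp] at ih
        simp only [Option.some_or] at ih ⊢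
        rw [← ih]
        simp [hbf]
      | none =>
        rw [hp] at ih
        simp only [Option.none_or] at ih ⊢
        rw [List.find?_cons_of_pos (by simp [hx])]
        cases hq : List.find? (fun y => pvEnd y == t) q with
        | none => rw [hq] at ih; rw [← ih]
        | some b =>
          rw [hq] at ih
          rw [← ih]
          have hb : b ∈ q := List.mem_of_find?_eq_some hq
          have hbt : pvEnd b = t := by simpa using List.find?_some hq
          have hbx : pvLT b x := by
            cases q with
            | nil => simp at hb
            | cons h tl =>
              have hhx : pvLT h x := pvBef_iff.mp (h4 h tl rfl)
              rcases List.mem_cons.mp hb with rfl | hb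
              · exact hhx
              · have hq2 := (List.pairwise_append.mp hs).2.1
                exact pvLT_of_not_of_lt ((List.pairwise_cons.mp hq2).1 b hb) hhx
          have hf : pvFiled b < pvFiled x := by
            rcases hbx with h | h
            · exact absurd (hbt.trans hx.symm) (ne_of_lt h)
            · exact h.2
          simp [hf]
    · rw [if_neg hx]
      rw [List.find?_cons_of_neg (by simp [hx])]
      rw [← ih, List.find?_append]

-- A's dedup loop, recursively
def pvDedup : List (List (String × String)) → PySem.Set String → List (List (String × String))
  | [], _ => []
  | e :: S, seen =>
      if PySem.Set.contains seen (pvEnd e) then pvDedup S seen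
      else e :: pvDedup S (PySem.Set.add seen (pvEnd e))

theorem dedup_foldl (S : List (List (String × String))) (seen : PySem.Set String)
    (out : List (List (String × String))) :
    (S.foldl
      (fun (st : PySem.Set String × List (List (String × String))) entry =>
        let e := pvEnd entry
        if PySem.Set.contains st.1 e then st
        else (PySem.Set.add st.1 e, st.2 ++ [entry]))
      (seen, out)).2 = out ++ pvDedup S seen := by
  induction S generalizing seen out with
  | nil => simp [pvDedup]
  | cons e S ih =>
    unfold pvDedup
    by_cases h : PySem.Set.contains seen (pvEnd e) = true
    · rw [if_pos h]
      have hm : pvEnd e ∈ seen := (PySem.Set.contains_iff _ _).mp h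
      simpa [hm] using ih seen out
    · rw [if_neg h]
      have hm : pvEnd e ∉ seen := fun hm => h ((PySem.Set.contains_iff _ _).mpr hm)
      simpa [hm] using ih (PySem.Set.add seen (pvEnd e)) (out ++ [e])

theorem dedup_sublist (S : List (List (String × String))) (seen : PySem.Set String) :
    (pvDedup S seen).Sublist S := by
  induction S generalizing seen with
  | nil => simp [pvDedup]
  | cons e S ih =>
    unfold pvDedup
    split
    · exact (ih seen).trans (List.sublist_cons_self e S)
    · exact List.Sublist.cons₂ e (ih _)

theorem dedup_mem (S : List (List (String × String))) (seen : PySem.Set String)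
    (e : List (String × String)) :
    e ∈ pvDedup S seen ↔
      PySem.Set.contains seen (pvEnd e) = false ∧
        S.find? (fun y => pvEnd y == pvEnd e) = some e := by
  induction S generalizing seen with
  | nil => simp [pvDedup]
  | cons x S ih =>
    unfold pvDedup
    by_cases hx : PySem.Set.contains seen (pvEnd x) = true
    · rw [if_pos hx, ih]
      have hne : pvEnd x ≠ pvEnd e ∨ PySem.Set.contains seen (pvEnd e) = true := by
        by_cases h : pvEnd x = pvEnd e
        · exact Or.inr (h ▸ hx)
        · exact Or.inl h
      constructor
      · rintro ⟨h1, h2⟩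
        refine ⟨h1, ?_⟩
        have hxe : pvEnd x ≠ pvEnd e := by
          rcases hne with h | h
          · exact h
          · rw [h] at h1; cases h1
        simp [hxe]
        exact h2
      · rintro ⟨h1, h2⟩
        have hxe : pvEnd x ≠ pvEnd e := by
          rcases hne with h | h
          · exact h
          · rw [h] at h1; cases h1
        rw [List.find?_cons_of_neg (by simp [hxe])] at h2
        exact ⟨h1, h2⟩
    · rw [if_neg hx]
      simp only [List.mem_cons, ih]
      constructor
      · rintro (rfl | ⟨h1, h2⟩)
        · exact ⟨by simpa using hx, by simp⟩
        · simp only [Bool.eq_false_iff, ne_eq] at h1 ⊢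
          rw [show ((PySem.Set.add seen (pvEnd x)).contains (pvEnd e) = true) ↔ _ from PySem.Set.contains_iff _ _, PySem.Set.mem_add] at h1
          have hxe : pvEnd e ≠ pvEnd x := fun h => h1 (Or.inr h)
          refine ⟨fun hc => h1 (Or.inl ((PySem.Set.contains_iff _ _).mp hc)), ?_⟩
          rw [List.find?_cons_of_neg (by simp [Ne.symm hxe])]
          exact h2
      · rintro ⟨h1, h2⟩
        by_cases hxe : pvEnd x = pvEnd e
        · left
          rw [List.find?_cons_of_pos (by simp [hxe])] at h2
          exact (Option.some.inj h2).symm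
        · right
          rw [List.find?_cons_of_neg (by simp [hxe])] at h2
          refine ⟨?_, h2⟩
          simp only [Bool.eq_false_iff, ne_eq] at h1 ⊢
          intro hc
          rw [show ((PySem.Set.add seen (pvEnd x)).contains (pvEnd e) = true) ↔ _ from PySem.Set.contains_iff _ _, PySem.Set.mem_add] at hc
          rcases hc with hc | hc
          · exact h1 ((PySem.Set.contains_iff _ _).mpr hc)
          · exact hxe hc.symm

theorem dedup_ends_nodup (S : List (List (String × String))) (seen : PySem.Set String) :
    ((pvDedup S seen).map pvEnd).Nodup := by
  induction S generalizing seen with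
  | nil => simp [pvDedup]
  | cons x S ih =>
    unfold pvDedup
    split
    · exact ih seen
    · rename_i hx
      simp only [List.map_cons, List.nodup_cons]
      refine ⟨?_, ih _⟩
      intro hmem
      obtain ⟨y, hy, hye⟩ := List.mem_map.mp hmem
      have := ((dedup_mem S _ y).mp hy).1
      rw [Bool.eq_false_iff] at this
      exact this ((PySem.Set.contains_iff _ _).mpr (PySem.Set.mem_add _ _ _ |>.mpr (Or.inr hye)))

-- B's grouping step over already-filtered entries
def pvStepB (d : PySem.Dict String (String × List (String × String))) (e : List (String × String)) :
    PySem.Dict String (String × List (String × String)) :=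
  match d.get? (pvEnd e) with
  | none => d.insert (pvEnd e) (pvFiled e, e)
  | some cur => if cur.1 < pvFiled e then d.insert (pvEnd e) (pvFiled e, e) else d

def pvGB (l : List (List (String × String))) : PySem.Dict String (String × List (String × String)) :=
  l.foldl pvStepB PySem.Dict.empty

theorem gB_get? (l : List (List (String × String))) (t : String) :
    (pvGB l).get? t = (pvBestOf l t).map (fun e => (pvFiled e, e)) := by
  induction l using List.reverseRecOn with
  | nil => simp [pvGB, pvBestOf, PySem.Dict.get?, PySem.Dict.empty]
  | append_singleton l x ih =>
    have hstep : pvGB (l ++ [x]) = pvStepB (pvGB l) x := by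
      simp [pvGB, List.foldl_append]
    rw [hstep, bestOf_append_singleton]
    unfold pvStepB
    by_cases hx : pvEnd x = t
    · rw [if_pos hx, hx, ih]
      cases hb : pvBestOf l t with
      | none => simp [PySem.Dict.get?_insert_self]
      | some b =>
        simp only [Option.map_some]
        by_cases hf : pvFiled b < pvFiled x
        · simp [hf, PySem.Dict.get?_insert_self]
        · simp [hf, ih, hb]
    · rw [if_neg hx]
      have hne : t ≠ pvEnd x := fun h => hx h.symm
      cases hb : (pvGB l).get? (pvEnd x) with
      | none =>
        show ((pvGB l).insert (pvEnd x) (pvFiled x, x)).get? t = _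
        rw [PySem.Dict.get?_insert_of_ne _ _ hne, ih]
      | some cur =>
        show (if cur.1 < pvFiled x then (pvGB l).insert (pvEnd x) (pvFiled x, x) else pvGB l).get? t = _
        by_cases hf : cur.1 < pvFiled x
        · rw [if_pos hf, PySem.Dict.get?_insert_of_ne _ _ hne, ih]
        · rw [if_neg hf, ih]

theorem gB_keys_nodup (l : List (List (String × String))) : (pvGB l).keys.Nodup := by
  have key : ∀ (l : List (List (String × String))) (d : PySem.Dict String (String × List (String × String))),
      d.keys.Nodup → (l.foldl pvStepB d).keys.Nodup := by
    intro l
    induction l with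
    | nil => intro d hd; exact hd
    | cons x xs ih =>
      intro d hd
      refine ih _ ?_
      unfold pvStepB
      cases d.get? (pvEnd x) with
      | none => exact PySem.Dict.nodup_keys_insert _ _ _ hd
      | some cur =>
        show (if cur.1 < pvFiled x then d.insert (pvEnd x) (pvFiled x, x) else d).keys.Nodup
        by_cases hf : cur.1 < pvFiled x
        · rw [if_pos hf]
          exact PySem.Dict.nodup_keys_insert _ _ _ hd
        · rw [if_neg hf]
          exact hd
  exact key l PySem.Dict.empty PySem.Dict.nodup_keys_empty

theorem gB_ends_eq_keys (l : List (List (String × String))) :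
    ((pvGB l).values.map (fun v => v.2)).map pvEnd = (pvGB l).keys := by
  have hitem : ∀ p ∈ (pvGB l).items, pvEnd p.2.2 = p.1 := by
    rintro ⟨k, fl, e⟩ hp
    have hget : (pvGB l).get? k = some (fl, e) :=
      ((PySem.Dict.get?_eq_some_iff_mem_items _ _ _ (gB_keys_nodup l)).mpr hp)
    rw [gB_get? l k] at hget
    cases hb : pvBestOf l k with
    | none => rw [hb] at hget; cases hget
    | some b =>
      rw [hb] at hget
      simp only [Option.map_some, Option.some.injEq, Prod.mk.injEq] at hget
      exact hget.2 ▸ bestOf_end hb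
  simp only [PySem.Dict.values, PySem.Dict.keys, List.map_map]
  exact List.map_congr_left fun p hp => hitem p hp

theorem gB_values_mem (l : List (List (String × String))) (e : List (String × String)) :
    e ∈ (pvGB l).values.map (fun v => v.2) ↔ pvBestOf l (pvEnd e) = some e := by
  simp only [PySem.Dict.values, List.map_map, List.mem_map, Function.comp]
  constructor
  · rintro ⟨⟨k, fl, e'⟩, hp, rfl⟩
    have hget : (pvGB l).get? k = some (fl, e') :=
      ((PySem.Dict.get?_eq_some_iff_mem_items _ _ _ (gB_keys_nodup l)).mpr hp)
    rw [gB_get? l k] at hget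
    cases hb : pvBestOf l k with
    | none => rw [hb] at hget; cases hget
    | some b =>
      rw [hb] at hget
      simp only [Option.map_some, Option.some.injEq, Prod.mk.injEq] at hget
      have hbe : b = e' := hget.2
      subst hbe
      have hk : pvEnd b = k := bestOf_end hb
      rw [hk]
      exact hb
  · intro hb
    have hget : (pvGB l).get? (pvEnd e) = some (pvFiled e, e) := by
      rw [gB_get? l (pvEnd e), hb]; rfl
    have hp := (PySem.Dict.get?_eq_some_iff_mem_items _ _ _ (gB_keys_nodup l)).mp hget
    exact ⟨(pvEnd e, pvFiled e, e), hp, rfl⟩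

-- core equality: A's dedup of the sorted filtered list IS the sorted list of B's group winners
theorem core_eq (l : List (List (String × String))) :
    pvDedup (pvSortR l) [] = pvSortR ((pvGB l).values.map (fun v => v.2)) := by
  have hBlist_ends : ((pvGB l).values.map (fun v => v.2)).map pvEnd |>.Nodup := by
    rw [gB_ends_eq_keys]; exact gB_keys_nodup l
  have hBlist_nodup : ((pvGB l).values.map (fun v => v.2)).Nodup :=
    List.Nodup.of_map pvEnd hBlist_ends
  set Bl := (pvGB l).values.map (fun v => v.2) with hBl
  -- membership
  have hmem : ∀ e, e ∈ pvDedup (pvSortR l) [] ↔ e ∈ pvSortR Bl := by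
    intro e
    rw [dedup_mem, find_sortR l (pvEnd e), (sortR_perm Bl).mem_iff, hBl, gB_values_mem]
    constructor
    · exact fun h => h.2
    · exact fun h => ⟨rfl, h⟩
  -- nodup
  have hA_ends := dedup_ends_nodup (pvSortR l) []
  have hA_nodup : (pvDedup (pvSortR l) []).Nodup := List.Nodup.of_map pvEnd hA_ends
  have hB_nodup : (pvSortR Bl).Nodup := ((sortR_perm Bl).nodup_iff).mpr hBlist_nodup
  have hperm : (pvDedup (pvSortR l) []).Perm (pvSortR Bl) :=
    (List.perm_ext_iff_of_nodup hA_nodup hB_nodup).mpr hmem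
  -- both strictly decreasing in the lex key
  have hstrict : ∀ (m : List (List (String × String))),
      m.Pairwise (fun a b => ¬ pvLT a b) → (m.map pvEnd).Nodup →
      m.Pairwise (fun a b => pvLT b a) := by
    intro m h1 h2
    have h3 : m.Pairwise (fun a b => pvEnd a ≠ pvEnd b) := List.pairwise_map.mp h2
    exact (h1.and h3).imp fun h => pvLT_of_not_of_ne h.1 h.2
  have hA_sorted : (pvDedup (pvSortR l) []).Pairwise (fun a b => pvLT b a) :=
    hstrict _ (List.Pairwise.sublist (dedup_sublist _ _) (sortR_sorted l)) hA_ends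
  have hB_sorted : (pvSortR Bl).Pairwise (fun a b => pvLT b a) := by
    refine hstrict _ (sortR_sorted Bl) ?_
    exact (((sortR_perm Bl).map pvEnd).nodup_iff).mpr hBlist_ends
  exact List.Perm.eq_of_pairwise
    (fun a b _ _ h1 h2 => absurd h2 (pvLT_asymm h1)) hA_sorted hB_sorted hperm

-- ===== VERDICT (by name: the statement is the Claim_ definition above) =====
theorem latest_quarterly_py_spec : Claim_equal_latest_quarterly_py := by
  intro entries n _
  show latest_quarterly_py entries n = latest_quarterly_py_alt entries n
  show PySem.List.slice
      ((PySem.List.sorted2 (entries.filter pvFpOK) pvEnd pvFiled true).foldl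
        (fun (st : PySem.Set String × List (List (String × String))) entry =>
          let e := pvEnd entry
          if PySem.Set.contains st.1 e then st
          else (PySem.Set.add st.1 e, st.2 ++ [entry]))
        (PySem.Set.empty, [])).2 none (some n)
    = PySem.List.slice
        (PySem.List.sorted2
          ((entries.foldl
            (fun (d : PySem.Dict String (String × List (String × String))) e =>
              if pvFpOK e then
                match d.get? (pvEnd e) with
                | none => d.insert (pvEnd e) (pvFiled e, e)
                | some cur => if cur.1 < pvFiled e then d.insert (pvEnd e) (pvFiled e, e) else d
              else d)
            PySem.Dict.empty).values.map (fun v => v.2)) pvEnd pvFiled true) none (some n)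
  have hB : (entries.foldl
      (fun (d : PySem.Dict String (String × List (String × String))) e =>
        if pvFpOK e then
          match d.get? (pvEnd e) with
          | none => d.insert (pvEnd e) (pvFiled e, e)
          | some cur => if cur.1 < pvFiled e then d.insert (pvEnd e) (pvFiled e, e) else d
        else d)
      PySem.Dict.empty) = pvGB (entries.filter pvFpOK) := by
    unfold pvGB
    rw [List.foldl_filter]
    rfl
  rw [hB, sorted2_eq_sortR, sorted2_eq_sortR, dedup_foldl, List.nil_append,
    show (PySem.Set.empty : PySem.Set String) = [] from rfl,
    core_eq (entries.filter pvFpOK)]
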